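-- pv_equiv track=rewrite | github.com/BioSTEAMDevelopmentGroup/biosteam | biosteam/plots/sankey.py | abbreviate_word
-- ===== SOURCE A (Python) =====
-- def abbreviate_word(word):
--     if len(word) < 5: return word
--     original_word = word
--     word = word.lower()
--     vocals = 'aeiouy'
--     for index, letter in enumerate(word):
--         if letter in vocals: break
--     for index, letter in enumerate(word[index:], index + 1):
--         if letter not in vocals: break
--     for index, letter in enumerate(word[index:], index + 1):
--         if letter in vocals:
--             index -= 1
--             break
--     if index < len(word):
--         return original_word[:index] + '.'
--     else:
--         return original_word
-- ===== SOURCE B (Python) =====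
-- import re
--
-- _VCV = re.compile(r'[aeiouy]+[^aeiouy]+[aeiouy]')
--
-- def abbreviate_word(word):
--     if len(word) < 5:
--         return word
--     m = _VCV.search(word.lower())
--     if m is None:
--         return word
--     return word[:m.end() - 1] + '.'
-- ===== Notes on version B (the rewrite author's own statement) =====
-- stated objective: idiomatic
-- what changed: Replaces A's three sequential enumerate-loops with manual off-by-one index bookkeeping by a single regex search for the vowel+ nonvowel+ vowel boundary (m.end()-1 is the cut point).
import Mathlib
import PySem

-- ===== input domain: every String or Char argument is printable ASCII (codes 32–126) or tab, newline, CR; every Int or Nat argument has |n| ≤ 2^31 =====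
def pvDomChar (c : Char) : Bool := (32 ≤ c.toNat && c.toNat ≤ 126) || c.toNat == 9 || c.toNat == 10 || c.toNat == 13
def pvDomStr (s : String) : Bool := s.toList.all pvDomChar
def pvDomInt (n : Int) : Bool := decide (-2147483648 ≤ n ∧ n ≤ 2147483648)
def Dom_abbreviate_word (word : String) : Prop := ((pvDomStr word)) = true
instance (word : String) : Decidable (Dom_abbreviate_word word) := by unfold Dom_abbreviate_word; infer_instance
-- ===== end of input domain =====

-- B replaces A's three sequential index-tracking scan loops by a single leftmost
-- match of the fixed pattern [aeiouy]+[^aeiouy]+[aeiouy] (re.search; more idiomatic).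


-- ===== PORT A =====
def awVocals : List Char := "aeiouy".toList

-- first loop: break at first vowel; if no break, index keeps its last enumerate value
def awLoop1 : List Char → Nat → Nat
  | [], i => i - 1
  | c :: t, i => if awVocals.contains c then i else awLoop1 t (i + 1)

-- second loop: enumerate(word[index:], index + 1), break at first non-vowel
def awLoop2 : List Char → Nat → Nat
  | [], i => i - 1
  | c :: t, i => if !(awVocals.contains c) then i else awLoop2 t (i + 1)

-- third loop: break at first vowel, then index -= 1
def awLoop3 : List Char → Nat → Nat
  | [], i => i - 1
  | c :: t, i => if awVocals.contains c then i - 1 else awLoop3 t (i + 1)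

def abbreviate_word (word : String) : String :=
  if word.toList.length < 5 then word
  else
    let orig := word.toList
    let w := PySem.Chars.lower word.toList
    let i1 := awLoop1 w 0
    let i2 := awLoop2 (w.drop i1) (i1 + 1)
    let i3 := awLoop3 (w.drop i2) (i2 + 1)
    if i3 < w.length then String.ofList (orig.take i3 ++ ['.'])
    else word

-- ===== PORT B =====
def rxVowel (c : Char) : Bool := ("aeiouy".toList).contains c

-- hand port of re matching of [aeiouy]+[^aeiouy]+[aeiouy] at one position: exact here
-- because the two character classes are complementary, so the greedy '+' runs never backtrack
def rxMatchHere (l : List Char) : Option Nat :=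
  let v := l.takeWhile rxVowel
  if v.isEmpty then none
  else
    let rest := l.dropWhile rxVowel
    let cr := rest.takeWhile (fun c => !rxVowel c)
    if cr.isEmpty then none
    else
      match rest.dropWhile (fun c => !rxVowel c) with
      | c :: _ => if rxVowel c then some (v.length + cr.length + 1) else none
      | [] => none

-- re.search: try each start position left to right, return the end of the first match
def rxSearch : List Char → Nat → Option Nat
  | [], _ => none
  | c :: t, i =>
    match rxMatchHere (c :: t) with
    | some len => some (i + len)
    | none => rxSearch t (i + 1)

def abbreviate_word_alt (word : String) : String :=
  if word.toList.length < 5 then word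
  else
    match rxSearch (PySem.Chars.lower word.toList) 0 with
    | none => word
    | some e => String.ofList (word.toList.take (e - 1) ++ ['.'])

-- ===== PRECONDITION & SPEC =====
def Spec_abbreviate_word (word : String) (out : String) : Prop := out = abbreviate_word_alt word
instance (word : String) (out : String) : Decidable (Spec_abbreviate_word word out) := by unfold Spec_abbreviate_word; infer_instance

-- ===== CLAIM (what is proved, stated in full; the proofs are below) =====
def Claim_equal_abbreviate_word : Prop := ∀ (word : String), Dom_abbreviate_word word → Spec_abbreviate_word word (abbreviate_word word)

-- ===== LEMMAS AND PROOFS =====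

-- A's final index, as the let-chain of abbreviate_word (proof abbreviation)
def aIndex (l : List Char) : Nat :=
  awLoop3 (l.drop (awLoop2 (l.drop (awLoop1 l 0)) (awLoop1 l 0 + 1)))
    (awLoop2 (l.drop (awLoop1 l 0)) (awLoop1 l 0 + 1) + 1)

theorem takeWhile_append_of_all {α : Type} (q : α → Bool) (l t : List α)
    (h : l.all q) : (l ++ t).takeWhile q = l ++ t.takeWhile q := by
  induction l with
  | nil => simp
  | cons c l ih => simp_all [List.takeWhile]

theorem dropWhile_append_of_all {α : Type} (q : α → Bool) (l t : List α)
    (h : l.all q) : (l ++ t).dropWhile q = t.dropWhile q := by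
  induction l with
  | nil => simp
  | cons c l ih => simp_all [List.dropWhile]

theorem head_dropWhile_false {α : Type} (q : α → Bool) (l : List α) (c : α) (t : List α)
    (h : l.dropWhile q = c :: t) : q c = false := by
  induction l with
  | nil => simp at h
  | cons a l ih =>
    by_cases ha : q a
    · simp [List.dropWhile, ha] at h; exact ih h
    · simp [List.dropWhile, ha] at h
      rw [← h.1]; simpa using ha

theorem awLoop1_append (N t : List Char) (i : ℕ)
    (h : N.all (fun c => !rxVowel c)) :
    awLoop1 (N ++ t) i = awLoop1 t (i + N.length) := by
  induction N generalizing i with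
  | nil => simp
  | cons c N ih =>
    simp only [List.all_cons, Bool.and_eq_true, Bool.not_eq_eq_eq_not, Bool.not_true] at h
    have hcv : awVocals.contains c = false := h.1
    have step : awLoop1 (c :: (N ++ t)) i = awLoop1 (N ++ t) (i + 1) := by
      simp only [awLoop1, hcv, Bool.false_eq_true, if_false]
    rw [List.cons_append, step, ih _ h.2]
    have e : i + 1 + N.length = i + (c :: N).length := by
      simp only [List.length_cons]; omega
    rw [e]

theorem awLoop2_append (V t : List Char) (i : ℕ)
    (h : V.all rxVowel) :
    awLoop2 (V ++ t) i = awLoop2 t (i + V.length) := by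
  induction V generalizing i with
  | nil => simp
  | cons c V ih =>
    simp only [List.all_cons, Bool.and_eq_true] at h
    have hcv : awVocals.contains c = true := h.1
    have step : awLoop2 (c :: (V ++ t)) i = awLoop2 (V ++ t) (i + 1) := by
      simp only [awLoop2, hcv, Bool.not_true, Bool.false_eq_true, if_false]
    rw [List.cons_append, step, ih _ h.2]
    have e : i + 1 + V.length = i + (c :: V).length := by
      simp only [List.length_cons]; omega
    rw [e]

theorem awLoop3_append (C t : List Char) (i : ℕ)
    (h : C.all (fun c => !rxVowel c)) :
    awLoop3 (C ++ t) i = awLoop3 t (i + C.length) := by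
  induction C generalizing i with
  | nil => simp
  | cons c C ih =>
    simp only [List.all_cons, Bool.and_eq_true, Bool.not_eq_eq_eq_not, Bool.not_true] at h
    have hcv : awVocals.contains c = false := h.1
    have step : awLoop3 (c :: (C ++ t)) i = awLoop3 (C ++ t) (i + 1) := by
      simp only [awLoop3, hcv, Bool.false_eq_true, if_false]
    rw [List.cons_append, step, ih _ h.2]
    have e : i + 1 + C.length = i + (c :: C).length := by
      simp only [List.length_cons]; omega
    rw [e]

theorem rxMatchHere_none_of_VC (V C : List Char)
    (hV : V.all rxVowel) (hC : C.all (fun c => !rxVowel c)) :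
    rxMatchHere (V ++ C) = none := by
  cases C with
  | nil =>
    cases V with
    | nil => rfl
    | cons a V' =>
      have h1 : ((a :: V') ++ ([] : List Char)).takeWhile rxVowel = (a :: V') := by
        rw [takeWhile_append_of_all _ _ _ hV]; simp
      have h2 : ((a :: V') ++ ([] : List Char)).dropWhile rxVowel = [] := by
        rw [dropWhile_append_of_all _ _ _ hV]; simp
      simp only [List.append_nil] at h1 h2
      simp [rxMatchHere, h1, h2]
  | cons d C' =>
    have hCall : ∀ x ∈ d :: C', (!rxVowel x) = true := List.all_eq_true.mp hC
    have hd : rxVowel d = false := by simpa using hCall d (by simp)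
    have h3 : (d :: C').takeWhile (fun c => !rxVowel c) = d :: C' :=
      List.takeWhile_eq_self_iff.mpr hCall
    have h4 : (d :: C').dropWhile (fun c => !rxVowel c) = [] :=
      List.dropWhile_eq_nil_iff.mpr hCall
    have h1 : (V ++ d :: C').takeWhile rxVowel = V := by
      rw [takeWhile_append_of_all _ _ _ hV]; simp [List.takeWhile, hd]
    have h2 : (V ++ d :: C').dropWhile rxVowel = d :: C' := by
      rw [dropWhile_append_of_all _ _ _ hV]; simp [List.dropWhile, hd]
    cases V with
    | nil =>
      simp only [List.nil_append] at h1 h2 ⊢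
      simp [rxMatchHere, h1]
    | cons a V' =>
      simp only [List.cons_append] at h1 h2
      simp [rxMatchHere, h1, h2, h3, h4]

theorem rxMatchHere_some_of (V : List Char) (d : Char) (C' : List Char) (z : Char) (r : List Char)
    (hVne : V ≠ []) (hV : V.all rxVowel) (hd : rxVowel d = false)
    (hC' : C'.all (fun c => !rxVowel c)) (hz : rxVowel z = true) :
    rxMatchHere (V ++ (d :: C') ++ z :: r) = some (V.length + (d :: C').length + 1) := by
  have hassoc : V ++ (d :: C') ++ z :: r = V ++ (d :: (C' ++ z :: r)) := by simp
  have h1 : (V ++ (d :: (C' ++ z :: r))).takeWhile rxVowel = V := by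
    rw [takeWhile_append_of_all _ _ _ hV]; simp [List.takeWhile, hd]
  have h2 : (V ++ (d :: (C' ++ z :: r))).dropWhile rxVowel = d :: (C' ++ z :: r) := by
    rw [dropWhile_append_of_all _ _ _ hV]; simp [List.dropWhile, hd]
  have h3 : (d :: (C' ++ z :: r)).takeWhile (fun c => !rxVowel c) = d :: C' := by
    simp only [List.takeWhile, hd]
    rw [takeWhile_append_of_all _ _ _ hC']
    simp [List.takeWhile, hz]
  have h4 : (d :: (C' ++ z :: r)).dropWhile (fun c => !rxVowel c) = z :: r := by
    simp only [List.dropWhile, hd]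
    rw [dropWhile_append_of_all _ _ _ hC']
    simp [List.dropWhile, hz]
  rw [hassoc]
  simp [rxMatchHere, h1, h2, h3, h4, hz, List.isEmpty_iff, hVne]

theorem rxSearch_skip (N t : List Char) (i : ℕ)
    (h : N.all (fun c => !rxVowel c)) :
    rxSearch (N ++ t) i = rxSearch t (i + N.length) := by
  induction N generalizing i with
  | nil => simp
  | cons c N ih =>
    simp only [List.all_cons, Bool.and_eq_true, Bool.not_eq_eq_eq_not, Bool.not_true] at h
    have hm : rxMatchHere (c :: (N ++ t)) = none := by
      simp [rxMatchHere, List.takeWhile, h.1]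
    simp only [List.cons_append, rxSearch, hm]
    rw [ih _ h.2]
    have e : i + 1 + N.length = i + (c :: N).length := by
      simp only [List.length_cons]; omega
    rw [e]

theorem rxSearch_vn_none (V C : List Char) (i : ℕ)
    (hV : V.all rxVowel) (hC : C.all (fun c => !rxVowel c)) :
    rxSearch (V ++ C) i = none := by
  induction V generalizing i with
  | nil =>
    have := rxSearch_skip C [] i hC
    simpa [rxSearch] using this
  | cons c V ih =>
    simp only [List.all_cons, Bool.and_eq_true] at hV
    have hm : rxMatchHere ((c :: V) ++ C) = none :=
      rxMatchHere_none_of_VC (c :: V) C (by simp [hV.1, hV.2]) hC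
    simp only [List.cons_append] at hm
    simp only [List.cons_append, rxSearch, hm]
    exact ih _ hV.2

theorem rxSearch_found (V : List Char) (d : Char) (C' : List Char) (z : Char) (r : List Char) (i : ℕ)
    (hVne : V ≠ []) (hV : V.all rxVowel) (hd : rxVowel d = false)
    (hC' : C'.all (fun c => !rxVowel c)) (hz : rxVowel z = true) :
    rxSearch (V ++ (d :: C') ++ z :: r) i = some (i + (V.length + (d :: C').length + 1)) := by
  obtain ⟨a, V', rfl⟩ : ∃ a V', V = a :: V' := by
    cases V with
    | nil => exact absurd rfl hVne
    | cons a V' => exact ⟨a, V', rfl⟩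
  have hm := rxMatchHere_some_of (a :: V') d C' z r hVne hV hd hC' hz
  simp only [List.cons_append, List.append_assoc] at hm ⊢
  simp [rxSearch, hm]

theorem all_drop {α : Type} (q : α → Bool) (l : List α) (k : ℕ)
    (h : l.all q) : (l.drop k).all q := by
  rw [List.all_eq_true] at h ⊢
  intro x hx
  exact h x (List.mem_of_mem_drop hx)

-- core: A's final index against B's leftmost-match search, on the lowered char list
theorem core (l : List Char) (hne : l ≠ []) :
    (rxSearch l 0 = none ∧ aIndex l = l.length) ∨
    (∃ k, rxSearch l 0 = some (k + 1) ∧ aIndex l = k ∧ k < l.length) := by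
  have hsplit1 : l.takeWhile (fun c => !rxVowel c) ++ l.dropWhile (fun c => !rxVowel c) = l :=
    List.takeWhile_append_dropWhile
  set N := l.takeWhile (fun c => !rxVowel c) with hN
  set rest1 := l.dropWhile (fun c => !rxVowel c) with hrest1
  have hNall : N.all (fun c => !rxVowel c) := List.all_takeWhile
  cases hr1 : rest1 with
  | nil =>
    -- no vowel at all: first loop falls off the end, result length - 1
    have hlall : l.all (fun c => !rxVowel c) := by
      rw [← hsplit1, hr1, List.append_nil]; exact hNall
    have hlen : N.length = l.length := by rw [← hsplit1, hr1]; simp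
    have hi1 : awLoop1 l 0 = l.length - 1 := by
      conv_lhs => rw [← hsplit1, hr1, List.append_nil]
      have := awLoop1_append N [] 0 hNall
      simp only [List.append_nil] at this
      rw [this, hlen]
      simp only [awLoop1]
      omega
    have hpos : 1 ≤ l.length := by
      cases l with
      | nil => exact absurd rfl hne
      | cons a t => simp
    have hdr : (l.drop (l.length - 1)).length = 1 := by
      rw [List.length_drop]; omega
    obtain ⟨m, hm⟩ := List.length_eq_one_iff.mp hdr
    have hmall : rxVowel m = false := by
      have := all_drop _ l (l.length - 1) hlall
      rw [hm] at this
      simpa using this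
    have hi2 : awLoop2 (l.drop (awLoop1 l 0)) (awLoop1 l 0 + 1) = l.length := by
      rw [hi1, hm]
      have hmv : awVocals.contains m = false := hmall
      simp only [awLoop2, hmv, Bool.not_false]
      simp
      omega
    have hi3 : aIndex l = l.length := by
      unfold aIndex
      rw [hi2, List.drop_length]
      simp [awLoop3]
    left
    refine ⟨?_, hi3⟩
    have := rxSearch_vn_none [] N 0 (by simp) hNall
    simpa [← hsplit1, hr1, List.append_nil] using this
  | cons c t1 =>
    have hc : rxVowel c := by
      have := head_dropWhile_false (fun c => !rxVowel c) l c t1 (by rw [← hrest1, hr1])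
      simpa using this
    have hi1 : awLoop1 l 0 = N.length := by
      conv_lhs => rw [← hsplit1, hr1]
      rw [awLoop1_append N (c :: t1) 0 hNall]
      have hcv : awVocals.contains c = true := hc
      simp only [awLoop1, hcv]
      simp
    have hdrop1 : l.drop N.length = rest1 := by
      conv_lhs => rw [← hsplit1]
      exact List.drop_left
    -- second split
    have hsplit2 : rest1.takeWhile rxVowel ++ rest1.dropWhile rxVowel = rest1 :=
      List.takeWhile_append_dropWhile
    set V := rest1.takeWhile rxVowel with hV
    set rest2 := rest1.dropWhile rxVowel with hrest2
    have hVall : V.all rxVowel := List.all_takeWhile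
    have hVne : V ≠ [] := by
      rw [hV, hr1]
      simp [List.takeWhile, hc]
    have hlV : l = N ++ V ++ rest2 := by
      rw [List.append_assoc, hsplit2, hsplit1]
    have hi2pre : awLoop2 (l.drop (awLoop1 l 0)) (awLoop1 l 0 + 1)
        = awLoop2 rest2 (N.length + 1 + V.length) := by
      rw [hi1, hdrop1, ← hsplit2, awLoop2_append V rest2 (N.length + 1) hVall]
    cases hr2 : rest2 with
    | nil =>
      -- vowels to the end: second loop falls off, index = len; A keeps the word
      have hlen2 : l.length = N.length + V.length := by
        rw [hlV, hr2]; simp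
      have hi2 : awLoop2 (l.drop (awLoop1 l 0)) (awLoop1 l 0 + 1) = l.length := by
        rw [hi2pre, hr2]
        simp [awLoop2]
        omega
      have hi3 : aIndex l = l.length := by
        unfold aIndex
        rw [hi2, List.drop_length]
        simp [awLoop3]
      left
      refine ⟨?_, hi3⟩
      have h1 : rxSearch l 0 = rxSearch rest1 N.length := by
        conv_lhs => rw [← hsplit1]
        have := rxSearch_skip N rest1 0 hNall
        simpa using this
      rw [h1, ← hsplit2, hr2, List.append_nil]
      have := rxSearch_vn_none V [] N.length hVall (by simp)
      simpa using this
    | cons d t2 =>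
      have hd : rxVowel d = false := by
        have := head_dropWhile_false rxVowel rest1 d t2 (by rw [← hrest2, hr2])
        simpa using this
      have hi2 : awLoop2 (l.drop (awLoop1 l 0)) (awLoop1 l 0 + 1) = N.length + V.length + 1 := by
        rw [hi2pre, hr2]
        have hdv : awVocals.contains d = false := hd
        simp only [awLoop2, hdv, Bool.not_false]
        simp
        omega
      have hdrop2 : l.drop (N.length + V.length) = rest2 := by
        conv_lhs => rw [hlV]
        rw [show N.length + V.length = (N ++ V).length from by simp]
        exact List.drop_left
      have hdrop2' : l.drop (N.length + V.length + 1) = t2 := by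
        have : l.drop (N.length + V.length + 1) = (l.drop (N.length + V.length)).drop 1 := by
          rw [List.drop_drop]
        rw [this, hdrop2, hr2]
        simp
      -- third split inside t2
      have hsplit3 : t2.takeWhile (fun c => !rxVowel c) ++ t2.dropWhile (fun c => !rxVowel c) = t2 :=
        List.takeWhile_append_dropWhile
      set C' := t2.takeWhile (fun c => !rxVowel c) with hC'
      set r := t2.dropWhile (fun c => !rxVowel c) with hr
      have hC'all : C'.all (fun c => !rxVowel c) := List.all_takeWhile
      have hi3pre : aIndex l = awLoop3 r (N.length + V.length + 1 + 1 + C'.length) := by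
        unfold aIndex
        rw [hi2, hdrop2', ← hsplit3, awLoop3_append C' r (N.length + V.length + 1 + 1) hC'all]
      have hlfull : l = N ++ V ++ (d :: C') ++ r := by
        rw [hlV, hr2, ← hsplit3]
        simp
      cases hr0 : r with
      | nil =>
        have hlen3 : l.length = N.length + V.length + 1 + C'.length := by
          rw [hlfull, hr0]; simp; omega
        have hi3 : aIndex l = l.length := by
          rw [hi3pre, hr0]
          simp only [awLoop3]
          omega
        left
        refine ⟨?_, hi3⟩
        have h1 : rxSearch l 0 = rxSearch rest1 N.length := by
          conv_lhs => rw [← hsplit1]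
          have := rxSearch_skip N rest1 0 hNall
          simpa using this
        have hrest1eq : rest1 = V ++ (d :: C') := by
          rw [← hsplit2, hr2, ← hsplit3, hr0]
          simp
        rw [h1, hrest1eq]
        exact rxSearch_vn_none V (d :: C') N.length hVall
          (by simp only [List.all_cons, hd, Bool.not_false, Bool.true_and]; exact hC'all)
      | cons z r' =>
        have hz : rxVowel z = true := by
          have := head_dropWhile_false (fun c => !rxVowel c) t2 z r' (by rw [← hr, hr0])
          simpa using this
        have hi3 : aIndex l = N.length + V.length + 1 + C'.length := by
          rw [hi3pre, hr0]
          have hzv : awVocals.contains z = true := hz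
          simp only [awLoop3, hzv]
          simp
        have hlen4 : l.length = N.length + V.length + 1 + C'.length + 1 + r'.length := by
          rw [hlfull, hr0]; simp; omega
        right
        refine ⟨N.length + V.length + 1 + C'.length, ?_, hi3, by omega⟩
        have h1 : rxSearch l 0 = rxSearch rest1 N.length := by
          conv_lhs => rw [← hsplit1]
          have := rxSearch_skip N rest1 0 hNall
          simpa using this
        have hrest1eq : rest1 = V ++ (d :: C') ++ z :: r' := by
          rw [← hsplit2, hr2, ← hsplit3, hr0]
          simp
        rw [h1, hrest1eq, rxSearch_found V d C' z r' N.length hVne hVall hd hC'all hz]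
        congr 1
        simp
        omega

-- ===== VERDICT (by name: the statement is the Claim_ definition above) =====
theorem abbreviate_word_spec : Claim_equal_abbreviate_word := by
  intro word _
  unfold Spec_abbreviate_word
  by_cases h5 : word.toList.length < 5
  · unfold abbreviate_word abbreviate_word_alt
    rw [if_pos h5, if_pos h5]
  · have hlen : (PySem.Chars.lower word.toList).length = word.toList.length := by
      simp [PySem.Chars.lower]
    have hne : PySem.Chars.lower word.toList ≠ [] := by
      intro h
      have h0 : word.toList.length = 0 := by rw [← hlen, h]; rfl
      omega
    have hA : abbreviate_word word =
        (if aIndex (PySem.Chars.lower word.toList) < (PySem.Chars.lower word.toList).length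
         then String.ofList (word.toList.take (aIndex (PySem.Chars.lower word.toList)) ++ ['.'])
         else word) := by
      unfold abbreviate_word aIndex
      rw [if_neg h5]
    have hB : abbreviate_word_alt word =
        (match rxSearch (PySem.Chars.lower word.toList) 0 with
         | none => word
         | some e => String.ofList (word.toList.take (e - 1) ++ ['.'])) := by
      unfold abbreviate_word_alt
      rw [if_neg h5]
    rcases core (PySem.Chars.lower word.toList) hne with ⟨hs, hi⟩ | ⟨k, hs, hi, hk⟩
    · rw [hA, hB, hs, hi]
      simp
    · rw [hA, hB, hs, hi, if_pos hk]
      simp
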